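-- pv_equiv track=rewrite | github.com/y-kal/riskybisky | sbom_tool/normalize_sbom.py | compute_depths
-- ===== SOURCE A (Python) =====
-- from collections import defaultdict, deque
-- from typing import Any, Dict, List, Optional, Tuple
--
-- def compute_depths(nodes: List[str], deps: Dict[str, List[str]], roots: List[str]) -> Dict[str, int]:
--     depth: Dict[str, int] = {}
--     q = deque()
--     for r in roots:
--         depth[r] = 0
--         q.append(r)
--
--     while q:
--         cur = q.popleft()
--         for nxt in deps.get(cur, []):
--             if nxt not in nodes:
--                 continue
--             nd = depth[cur] + 1
--             if nxt not in depth or nd < depth[nxt]: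
--                 depth[nxt] = nd
--                 q.append(nxt)
--
--     for n in nodes:
--         if n not in depth:
--             depth[n] = 0
--     return depth
-- ===== SOURCE B (Python) =====
-- def compute_depths(nodes, deps, roots):
--     # Round-based monotone fixpoint instead of a BFS queue: each round rescans
--     # every assigned node and adds all newly reachable members of `nodes` at the
--     # next depth; no queue or frontier is maintained.
--     node_set = set(nodes)
--     depth = dict.fromkeys(roots, 0)
--     k = 0
--     while True:
--         k += 1
--         new = {v: k for u in depth for v in deps.get(u, [])
--                if v in node_set and v not in depth}
--         if not new:
--             break
--         depth.update(new)
--     for n in nodes: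
--         if n not in depth:
--             depth[n] = 0
--     return depth
-- ===== Notes on version B (the rewrite author's own statement) =====
-- stated objective: alternative
-- what changed: Replaces A's BFS relaxation queue by a queue-free monotone fixpoint: each round a dict comprehension rescans every already-assigned node and adds every newly reachable member of nodes at the next depth, repeating until a round adds nothing; membership in nodes becomes an O(1) set test instead of A's O(V) list scan per edge.
import Mathlib
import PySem

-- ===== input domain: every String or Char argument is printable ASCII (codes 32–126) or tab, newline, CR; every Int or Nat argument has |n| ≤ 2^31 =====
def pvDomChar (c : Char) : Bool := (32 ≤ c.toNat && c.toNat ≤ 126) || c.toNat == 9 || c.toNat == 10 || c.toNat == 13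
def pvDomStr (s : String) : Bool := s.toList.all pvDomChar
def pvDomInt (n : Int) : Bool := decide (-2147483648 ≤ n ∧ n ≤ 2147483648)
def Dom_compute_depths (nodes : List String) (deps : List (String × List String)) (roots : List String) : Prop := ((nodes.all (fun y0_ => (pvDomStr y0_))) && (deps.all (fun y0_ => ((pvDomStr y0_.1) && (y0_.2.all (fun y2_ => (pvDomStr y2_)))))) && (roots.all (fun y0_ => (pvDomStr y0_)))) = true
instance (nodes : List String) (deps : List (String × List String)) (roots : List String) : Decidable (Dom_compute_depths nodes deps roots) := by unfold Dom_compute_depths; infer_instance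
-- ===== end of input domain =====

-- B replaces A's BFS relaxation queue by a queue-free monotone fixpoint that each round
-- rescans every assigned node and adds all newly reachable members of `nodes` at the next
-- depth (objective: alternative algorithm, no queue/frontier state).

-- ===== PORT A =====
-- Inner for-loop of A's while-loop: expand `cur`, threading (depth, appended-queue-items).
-- `st.1.getD cur 0` totalizes Python's depth[cur]; cur is always a key when this runs.
def aIns (nodes : List String) (cur : String)
    (st : PySem.Dict String Int × List String) (nxt : String) :
    PySem.Dict String Int × List String :=
  if nodes.contains nxt then
    let nd := st.1.getD cur 0 + 1
    if !st.1.contains nxt || decide (nd < st.1.getD nxt 0) then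
      (st.1.insert nxt nd, st.2 ++ [nxt])
    else st
  else st

def aStep (nodes : List String) (deps : List (String × List String))
    (st : PySem.Dict String Int × List String) (cur : String) :
    PySem.Dict String Int × List String :=
  ((PySem.Dict.mk deps).getD cur []).foldl (aIns nodes cur) st

-- A's while-loop; `fuel` only totalizes it (proved sufficient below, never exhausted).
def aLoop (nodes : List String) (deps : List (String × List String)) :
    Nat → PySem.Dict String Int → List String → PySem.Dict String Int
  | _, d, [] => d
  | 0, d, _ :: _ => d
  | Nat.succ fuel, d, cur :: rest =>
      let st := aStep nodes deps (d, []) cur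
      aLoop nodes deps fuel st.1 (rest ++ st.2)

def compute_depths (nodes : List String) (deps : List (String × List String)) (roots : List String) : List (String × Int) :=
  let init := roots.foldl (fun (st : PySem.Dict String Int × List String) r =>
    (st.1.insert r 0, st.2 ++ [r])) (PySem.Dict.empty, [])
  let d := aLoop nodes deps (nodes.length + roots.length) init.1 init.2
  (nodes.foldl (fun d n => if d.contains n then d else d.insert n 0) d).items

-- ===== PORT B =====
-- One candidate of B's dict comprehension: add v at depth k if v is a fresh member of nodes.
def bNewStep (nodeSet : PySem.Set String) (d : PySem.Dict String Int) (k : Int)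
    (nd : PySem.Dict String Int) (v : String) : PySem.Dict String Int :=
  if PySem.Set.contains nodeSet v && !d.contains v then nd.insert v k else nd

-- B's dict comprehension {v: k for u in depth for v in deps.get(u, []) if …}.
def bNew (nodeSet : PySem.Set String) (deps : List (String × List String)) (k : Int)
    (d : PySem.Dict String Int) : PySem.Dict String Int :=
  (d.keys.flatMap (fun u => (PySem.Dict.mk deps).getD u [])).foldl
    (bNewStep nodeSet d k) PySem.Dict.empty

-- B's `while True` fixpoint loop; `fuel` only totalizes it (each continuing round adds a
-- fresh member of nodes, so nodes.length + 1 rounds always suffice; proved below).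
def bLoop (nodeSet : PySem.Set String) (deps : List (String × List String)) :
    Nat → Int → PySem.Dict String Int → PySem.Dict String Int
  | 0, _, d => d
  | Nat.succ fuel, k, d =>
      let nw := bNew nodeSet deps (k + 1) d
      if nw.items.isEmpty then d
      else bLoop nodeSet deps fuel (k + 1) (nw.items.foldl (fun m p => m.insert p.1 p.2) d)

def compute_depths_alt (nodes : List String) (deps : List (String × List String)) (roots : List String) : List (String × Int) :=
  let nodeSet := PySem.Set.ofList nodes
  let d0 := roots.foldl (fun (d : PySem.Dict String Int) r => d.insert r 0) PySem.Dict.empty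
  let d := bLoop nodeSet deps (nodes.length + 1) 0 d0
  (nodes.foldl (fun (d : PySem.Dict String Int) n => if d.contains n then d else d.insert n 0) d).items

-- ===== PRECONDITION & SPEC =====
def Spec_compute_depths (nodes : List String) (deps : List (String × List String)) (roots : List String) (out : List (String × Int)) : Prop := out = compute_depths_alt nodes deps roots
instance (nodes : List String) (deps : List (String × List String)) (roots : List String) (out : List (String × Int)) : Decidable (Spec_compute_depths nodes deps roots out) := by unfold Spec_compute_depths; infer_instance

-- ===== CLAIM (what is proved, stated in full; the proofs are below) =====
def Claim_equal_compute_depths : Prop := ∀ (nodes : List String) (deps : List (String × List String)) (roots : List String), Dom_compute_depths nodes deps roots → Spec_compute_depths nodes deps roots (compute_depths nodes deps roots)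

-- ===== LEMMAS AND PROOFS =====

-- proof-layer reference: level-synchronous BFS with an explicit frontier, the bridge
-- between A's queue and B's rescan fixpoint
def depsOf (deps : List (String × List String)) (u : String) : List String :=
  (PySem.Dict.mk deps).getD u []

def refIns (nodeSet : PySem.Set String) (level : Int)
    (st : PySem.Dict String Int × List String) (y : String) :
    PySem.Dict String Int × List String :=
  if PySem.Set.contains nodeSet y && !st.1.contains y then
    (st.1.insert y (level + 1), st.2 ++ [y])
  else st

def refStep (nodeSet : PySem.Set String) (deps : List (String × List String)) (level : Int)
    (st : PySem.Dict String Int × List String) (x : String) :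
    PySem.Dict String Int × List String :=
  (depsOf deps x).foldl (refIns nodeSet level) st

def refLoop (nodeSet : PySem.Set String) (deps : List (String × List String)) :
    Nat → Int → PySem.Dict String Int → List String → PySem.Dict String Int
  | _, _, d, [] => d
  | 0, _, d, _ :: _ => d
  | Nat.succ fuel, level, d, x :: xs =>
      let st := (x :: xs).foldl (refStep nodeSet deps level) (d, [])
      refLoop nodeSet deps fuel (level + 1) st.1 st.2

-- u's nodes-successors are all already assigned
def Sat (nodes : List String) (deps : List (String × List String))
    (d : PySem.Dict String Int) (u : String) : Prop :=
  ∀ v ∈ depsOf deps u, nodes.contains v = true → d.contains v = true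

-- depth.update(new), as B performs it
def mrg (m : PySem.Dict String Int) (l : List (String × Int)) : PySem.Dict String Int :=
  l.foldl (fun m p => m.insert p.1 p.2) m

-- first-occurrence dedup relative to a seen set
def fdd (s : PySem.Set String) : List String → List String
  | [] => []
  | x :: xs => if PySem.Set.contains s x then fdd s xs else x :: fdd (PySem.Set.add s x) xs

-- unassigned-node count, the fuel measure
def cnt (nodes : List String) (d : PySem.Dict String Int) : Nat :=
  nodes.countP (fun n => !d.contains n)

-- generic accumulator lemma: a fold whose step appends to the second component
theorem foldl_acc {step : PySem.Dict String Int × List String → String → PySem.Dict String Int × List String}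
    (h : ∀ d a x, step (d, a) x = ((step (d, []) x).1, a ++ (step (d, []) x).2)) :
    ∀ (l : List String) (d : PySem.Dict String Int) (a : List String),
      l.foldl step (d, a) = ((l.foldl step (d, [])).1, a ++ (l.foldl step (d, [])).2) := by
  intro l
  induction l with
  | nil => intro d a; simp
  | cons x xs ih =>
    intro d a
    simp only [List.foldl_cons]
    rw [h d a x, ih ((step (d, []) x).1) (a ++ (step (d, []) x).2),
        ih ((step (d, []) x).1) ((step (d, []) x).2)]
    simp

theorem aIns_acc (nodes : List String) (cur : String) :
    ∀ d a x, aIns nodes cur (d, a) x = ((aIns nodes cur (d, []) x).1, a ++ (aIns nodes cur (d, []) x).2) := by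
  intro d a x
  simp only [aIns]
  split_ifs <;> simp

theorem aStep_acc (nodes : List String) (deps : List (String × List String)) :
    ∀ d a x, aStep nodes deps (d, a) x = ((aStep nodes deps (d, []) x).1, a ++ (aStep nodes deps (d, []) x).2) := by
  intro d a x
  unfold aStep
  exact foldl_acc (aIns_acc nodes x) _ d a

theorem foldl_acc' {step : PySem.Dict String Int × List String → String → PySem.Dict String Int × List String}
    (h : ∀ d a x, step (d, a) x = ((step (d, []) x).1, a ++ (step (d, []) x).2))
    (l : List String) (st : PySem.Dict String Int × List String) :
    l.foldl step st = ((l.foldl step (st.1, [])).1, st.2 ++ (l.foldl step (st.1, [])).2) := by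
  obtain ⟨d, a⟩ := st
  exact foldl_acc h l d a

-- A's queue loop processes a frontier prefix exactly as a fold of aStep
theorem aLoop_frontier (nodes : List String) (deps : List (String × List String)) :
    ∀ (f p : List String) (d : PySem.Dict String Int) (fuel : Nat), f.length ≤ fuel →
      aLoop nodes deps fuel d (f ++ p) =
        aLoop nodes deps (fuel - f.length) (f.foldl (aStep nodes deps) (d, [])).1
          (p ++ (f.foldl (aStep nodes deps) (d, [])).2) := by
  intro f
  induction f with
  | nil => intro p d fuel _; simp
  | cons cur rest ih =>
    intro p d fuel hlen
    match fuel with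
    | 0 => simp at hlen
    | Nat.succ fu =>
      have hlen' : rest.length ≤ fu := by simp at hlen; omega
      rw [List.cons_append, aLoop, List.append_assoc,
          ih (p ++ (aStep nodes deps (d, []) cur).2) (aStep nodes deps (d, []) cur).1 fu hlen',
          List.foldl_cons, foldl_acc' (aStep_acc nodes deps) rest (aStep nodes deps (d, []) cur)]
      simp [Nat.succ_sub_succ]

theorem contains_ofList (s : List String) (y : String) :
    PySem.Set.contains (PySem.Set.ofList s) y = s.contains y := by
  simp [PySem.Set.contains, PySem.Set.mem_ofList]

theorem contains_of_get?_eq_some {d : PySem.Dict String Int} {k : String} {v : Int}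
    (h : d.get? k = some v) : d.contains k = true := by
  rw [PySem.Dict.contains_eq_isSome_get?, h]; rfl

theorem cnt_insert_le (nodes : List String) (d : PySem.Dict String Int) (y : String) (v : Int) :
    cnt nodes (d.insert y v) ≤ cnt nodes d := by
  unfold cnt
  apply List.countP_mono_left
  intro n _ hp
  simp only [PySem.Dict.contains_insert, Bool.not_eq_eq_eq_not, Bool.not_true, Bool.or_eq_false_iff] at hp
  simp [hp.2]

theorem cnt_insert_fresh (nodes : List String) (d : PySem.Dict String Int) (y : String) (v : Int)
    (hmem : y ∈ nodes) (hfree : d.contains y = false) :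
    cnt nodes (d.insert y v) + 1 ≤ cnt nodes d := by
  induction nodes with
  | nil => simp at hmem
  | cons n ns ih =>
    unfold cnt at *
    rw [List.countP_cons, List.countP_cons]
    by_cases hn : n = y
    · subst hn
      rw [PySem.Dict.contains_insert_self]
      have := cnt_insert_le ns d n v
      unfold cnt at this
      simp [hfree]
      omega
    · have hm : y ∈ ns := by cases hmem with
        | head => exact absurd rfl hn
        | tail _ h => exact h
      have hc : (d.insert y v).contains n = d.contains n := by
        rw [PySem.Dict.contains_insert]
        have : (n == y) = false := by simp [hn]
        simp [this]
      rw [hc]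
      have := ih hm
      omega

-- properties of a fold of refIns over any list of candidate neighbours
theorem refIns_fold_props (nodes : List String) (level : Int) :
    ∀ (l : List String) (d : PySem.Dict String Int) (a : List String),
      (∀ y ∈ a, d.get? y = some (level + 1)) →
      (∀ k v, d.get? k = some v → (l.foldl (refIns (PySem.Set.ofList nodes) level) (d, a)).1.get? k = some v) ∧
      (∀ k v, (l.foldl (refIns (PySem.Set.ofList nodes) level) (d, a)).1.get? k = some v → d.get? k = some v ∨ v = level + 1) ∧
      (∀ y ∈ (l.foldl (refIns (PySem.Set.ofList nodes) level) (d, a)).2,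
        (l.foldl (refIns (PySem.Set.ofList nodes) level) (d, a)).1.get? y = some (level + 1)) ∧
      cnt nodes (l.foldl (refIns (PySem.Set.ofList nodes) level) (d, a)).1
        + (l.foldl (refIns (PySem.Set.ofList nodes) level) (d, a)).2.length ≤ cnt nodes d + a.length := by
  intro l
  induction l with
  | nil => intro d a ha; exact ⟨fun k v h => h, fun k v h => Or.inl h, ha, le_refl _⟩
  | cons y ys ih =>
    intro d a ha
    rw [List.foldl_cons]
    by_cases hcond : (PySem.Set.contains (PySem.Set.ofList nodes) y && !d.contains y) = true
    · have hstep : refIns (PySem.Set.ofList nodes) level (d, a) y = (d.insert y (level + 1), a ++ [y]) := by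
        simp only [refIns, hcond, if_true]
      rw [hstep]
      have hfree : d.contains y = false := by
        have h2 := hcond
        simp only [Bool.and_eq_true] at h2
        simpa using h2.2
      have hmem : y ∈ nodes := by
        have h1 := hcond
        simp only [Bool.and_eq_true, contains_ofList] at h1
        simpa using h1.1
      have ha' : ∀ z ∈ a ++ [y], (d.insert y (level + 1)).get? z = some (level + 1) := by
        intro z hz
        rcases List.mem_append.mp hz with hz | hz
        · have hz' := ha z hz
          have hne : z ≠ y := by
            intro he; subst he
            exact absurd (contains_of_get?_eq_some hz') (by simp [hfree])
          rw [PySem.Dict.get?_insert_of_ne _ _ hne]; exact hz'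
        · simp only [List.mem_singleton] at hz; subst hz
          exact PySem.Dict.get?_insert_self _ _ _
      obtain ⟨P1, P2, P3, P4⟩ := ih (d.insert y (level + 1)) (a ++ [y]) ha'
      refine ⟨?_, ?_, P3, ?_⟩
      · intro k v h
        have hne : k ≠ y := by
          intro he; subst he
          exact absurd (contains_of_get?_eq_some h) (by simp [hfree])
        exact P1 k v (by rw [PySem.Dict.get?_insert_of_ne _ _ hne]; exact h)
      · intro k v h
        rcases P2 k v h with h' | h'
        · rw [PySem.Dict.get?_insert] at h'
          split_ifs at h' with he
          · exact Or.inr (by injection h'; omega)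
          · exact Or.inl h'
        · exact Or.inr h'
      · have := cnt_insert_fresh nodes d y (level + 1) hmem hfree
        simp only [List.length_append, List.length_singleton] at P4
        omega
    · have hstep : refIns (PySem.Set.ofList nodes) level (d, a) y = (d, a) := by
        have hcf : (PySem.Set.contains (PySem.Set.ofList nodes) y && !d.contains y) = false := Bool.eq_false_iff.mpr hcond
        unfold refIns
        rw [hcf]
        simp
      rw [hstep]
      exact ih d a ha

-- one frontier-element inner loop: A's relaxation branch never fires, so aIns = refIns
theorem inner_fold_eq (nodes : List String) (level : Int) (cur : String) :
    ∀ (l : List String) (d : PySem.Dict String Int) (a : List String),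
      d.get? cur = some level →
      (∀ k v, d.get? k = some v → v ≤ level + 1) →
      l.foldl (aIns nodes cur) (d, a) = l.foldl (refIns (PySem.Set.ofList nodes) level) (d, a) := by
  intro l
  induction l with
  | nil => intro d a _ _; rfl
  | cons y ys ih =>
    intro d a hcur hbnd
    rw [List.foldl_cons, List.foldl_cons]
    have hnd : d.getD cur 0 = level := PySem.Dict.getD_of_get?_eq_some _ _ hcur
    have hstep : aIns nodes cur (d, a) y = refIns (PySem.Set.ofList nodes) level (d, a) y := by
      simp only [aIns, refIns, contains_ofList, hnd]
      by_cases hm : nodes.contains y = true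
      · simp only [hm, Bool.true_and, if_true]
        by_cases hc : d.contains y = true
        · obtain ⟨v, hv⟩ : ∃ v, d.get? y = some v := by
            rw [PySem.Dict.contains_eq_isSome_get?] at hc
            exact Option.isSome_iff_exists.mp hc
          have hle : v ≤ level + 1 := hbnd y v hv
          have hgd : d.getD y 0 = v := PySem.Dict.getD_of_get?_eq_some _ _ hv
          simp [hc, hgd, not_lt.mpr hle]
        · simp [hc]
      · have hm' : y ∉ nodes := by simpa using hm
        simp [hm']
    rw [hstep]
    by_cases hcond : (PySem.Set.contains (PySem.Set.ofList nodes) y && !d.contains y) = true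
    · have hstep2 : refIns (PySem.Set.ofList nodes) level (d, a) y = (d.insert y (level + 1), a ++ [y]) := by
        simp only [refIns, hcond, if_true]
      rw [hstep2]
      have hfree : d.contains y = false := by
        have h2 := hcond
        simp only [Bool.and_eq_true] at h2
        simpa using h2.2
      have hne : cur ≠ y := by
        intro he; subst he
        exact absurd (contains_of_get?_eq_some hcur) (by simp [hfree])
      apply ih
      · rw [PySem.Dict.get?_insert_of_ne _ _ hne]; exact hcur
      · intro k v h
        rw [PySem.Dict.get?_insert] at h
        split_ifs at h with he
        · injection h with h; omega
        · exact hbnd k v h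
    · have hstep2 : refIns (PySem.Set.ofList nodes) level (d, a) y = (d, a) := by
        have hcf : (PySem.Set.contains (PySem.Set.ofList nodes) y && !d.contains y) = false := Bool.eq_false_iff.mpr hcond
        unfold refIns
        rw [hcf]
        simp
      rw [hstep2]
      exact ih d a hcur hbnd

-- fold of refStep over a frontier = fold of refIns over the concatenated neighbour lists
theorem foldl_refStep_flatMap (nodes : List String) (deps : List (String × List String)) (level : Int) :
    ∀ (f : List String) (st : PySem.Dict String Int × List String),
      f.foldl (refStep (PySem.Set.ofList nodes) deps level) st =
        (f.flatMap (depsOf deps)).foldl (refIns (PySem.Set.ofList nodes) level) st := by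
  intro f
  induction f with
  | nil => intro st; rfl
  | cons x xs ih =>
    intro st
    rw [List.foldl_cons, List.flatMap_cons, List.foldl_append]
    exact ih _

-- properties of one reference-level expansion (fold of refStep over the frontier)
theorem refFold_props (nodes : List String) (deps : List (String × List String)) (level : Int) :
    ∀ (f : List String) (d : PySem.Dict String Int),
      (∀ k v, d.get? k = some v → (f.foldl (refStep (PySem.Set.ofList nodes) deps level) (d, [])).1.get? k = some v) ∧
      (∀ k v, (f.foldl (refStep (PySem.Set.ofList nodes) deps level) (d, [])).1.get? k = some v → d.get? k = some v ∨ v = level + 1) ∧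
      (∀ y ∈ (f.foldl (refStep (PySem.Set.ofList nodes) deps level) (d, [])).2,
        (f.foldl (refStep (PySem.Set.ofList nodes) deps level) (d, [])).1.get? y = some (level + 1)) ∧
      cnt nodes (f.foldl (refStep (PySem.Set.ofList nodes) deps level) (d, [])).1
        + (f.foldl (refStep (PySem.Set.ofList nodes) deps level) (d, [])).2.length ≤ cnt nodes d := by
  intro f d
  rw [foldl_refStep_flatMap]
  have h := refIns_fold_props nodes level (f.flatMap (depsOf deps)) d [] (by simp)
  simpa using h

-- under the BFS invariant the relaxation branch of A never fires: aStep = refStep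
theorem fold_aStep_eq_refStep (nodes : List String) (deps : List (String × List String)) (level : Int) :
    ∀ (f : List String) (d : PySem.Dict String Int) (a : List String),
      (∀ x ∈ f, d.get? x = some level) →
      (∀ k v, d.get? k = some v → v ≤ level + 1) →
      (∀ y ∈ a, d.get? y = some (level + 1)) →
      f.foldl (aStep nodes deps) (d, a) = f.foldl (refStep (PySem.Set.ofList nodes) deps level) (d, a) := by
  intro f
  induction f with
  | nil => intro d a _ _ _; rfl
  | cons x xs ih =>
    intro d a hf hbnd ha
    rw [List.foldl_cons, List.foldl_cons]
    have hx : d.get? x = some level := hf x (List.mem_cons_self ..)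
    have hstep : aStep nodes deps (d, a) x = refStep (PySem.Set.ofList nodes) deps level (d, a) x := by
      unfold aStep refStep depsOf
      exact inner_fold_eq nodes level x _ d a hx hbnd
    rw [hstep]
    have hprops := refIns_fold_props nodes level (depsOf deps x) d a ha
    obtain ⟨P1, P2, P3, _⟩ := hprops
    have hfold : refStep (PySem.Set.ofList nodes) deps level (d, a) x =
        (depsOf deps x).foldl (refIns (PySem.Set.ofList nodes) level) (d, a) := rfl
    rw [hfold] at *
    apply ih
    · intro x' hx'
      exact P1 x' level (hf x' (List.mem_cons_of_mem _ hx'))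
    · intro k v h
      rcases P2 k v h with h' | h'
      · exact hbnd k v h'
      · omega
    · exact P3

theorem aLoop_nil (nodes : List String) (deps : List (String × List String))
    (fuel : Nat) (d : PySem.Dict String Int) : aLoop nodes deps fuel d [] = d := by
  cases fuel <;> rfl

theorem refLoop_nil (nodeSet : PySem.Set String) (deps : List (String × List String))
    (fuel : Nat) (level : Int) (d : PySem.Dict String Int) :
    refLoop nodeSet deps fuel level d [] = d := by
  cases fuel <;> rfl

-- first simulation: queue BFS = level-synchronous BFS
theorem loop_eq (nodes : List String) (deps : List (String × List String)) :
    ∀ (fuelB fuelA : Nat) (level : Int) (d : PySem.Dict String Int) (f : List String),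
      (∀ x ∈ f, d.get? x = some level) →
      (∀ k v, d.get? k = some v → v ≤ level) →
      f.length + cnt nodes d ≤ fuelA →
      cnt nodes d + 1 ≤ fuelB →
      aLoop nodes deps fuelA d f = refLoop (PySem.Set.ofList nodes) deps fuelB level d f := by
  intro fuelB
  induction fuelB with
  | zero => intro fuelA level d f _ _ _ hB; omega
  | succ fb ih =>
    intro fuelA level d f h1 h2 hA hB
    match f with
    | [] => rw [aLoop_nil, refLoop_nil]
    | x :: xs =>
      have hlen : (x :: xs).length ≤ fuelA := by omega
      have hfront := aLoop_frontier nodes deps (x :: xs) [] d fuelA hlen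
      rw [List.append_nil] at hfront
      have hbnd1 : ∀ k v, d.get? k = some v → v ≤ level + 1 := fun k v h => by
        have := h2 k v h; omega
      have heqfold := fold_aStep_eq_refStep nodes deps level (x :: xs) d [] h1 hbnd1 (by simp)
      obtain ⟨P1, P2, P3, P4⟩ := refFold_props nodes deps level (x :: xs) d
      set G := (x :: xs).foldl (refStep (PySem.Set.ofList nodes) deps level) (d, []) with hG
      rw [heqfold, List.nil_append] at hfront
      have hrhs : refLoop (PySem.Set.ofList nodes) deps (fb + 1) level d (x :: xs) =
          refLoop (PySem.Set.ofList nodes) deps fb (level + 1) G.1 G.2 := by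
        rw [refLoop]
      rw [hfront, hrhs]
      match hG2 : G.2 with
      | [] => rw [aLoop_nil, refLoop_nil]
      | y :: ys =>
        apply ih
        · intro z hz
          have := P3 z (by rw [hG2]; exact hz)
          simpa using this
        · intro k v h
          rcases P2 k v h with h' | h'
          · have := h2 k v h'; omega
          · omega
        · have : G.2.length = ys.length + 1 := by rw [hG2]; simp
          simp only [List.length_cons] at hA ⊢
          omega
        · have : G.2.length = ys.length + 1 := by rw [hG2]; simp
          omega

-- the root-seeding loop of A, with its queue accumulator, as B's plain dict fold
theorem seed_pair (rs : List String) :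
    ∀ (d : PySem.Dict String Int) (a : List String),
      rs.foldl (fun (st : PySem.Dict String Int × List String) r =>
        (st.1.insert r 0, st.2 ++ [r])) (d, a) =
      (rs.foldl (fun (d : PySem.Dict String Int) r => d.insert r 0) d, a ++ rs) := by
  induction rs with
  | nil => intro d a; simp
  | cons r rest ih =>
    intro d a
    simp only [List.foldl_cons]
    rw [ih]
    simp

theorem seed_contains (rs : List String) :
    ∀ (d : PySem.Dict String Int) (k : String), d.contains k = true →
      (rs.foldl (fun (d : PySem.Dict String Int) r => d.insert r 0) d).contains k = true := by
  induction rs with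
  | nil => intro d k h; exact h
  | cons r rest ih =>
    intro d k h
    simp only [List.foldl_cons]
    apply ih
    rw [PySem.Dict.contains_insert]
    simp [h]

theorem seed_val (rs : List String) :
    ∀ (d : PySem.Dict String Int) (k : String) (v : Int),
      (rs.foldl (fun (d : PySem.Dict String Int) r => d.insert r 0) d).get? k = some v →
      d.get? k = some v ∨ v = 0 := by
  induction rs with
  | nil => intro d k v h; exact Or.inl h
  | cons r rest ih =>
    intro d k v h
    simp only [List.foldl_cons] at h
    rcases ih _ k v h with h' | h'
    · rw [PySem.Dict.get?_insert] at h'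
      split_ifs at h' with he
      · exact Or.inr (by injection h'; omega)
      · exact Or.inl h'
    · exact Or.inr h'

theorem seed_mem (rs : List String) :
    ∀ (d : PySem.Dict String Int) (r : String), r ∈ rs →
      (rs.foldl (fun (d : PySem.Dict String Int) r => d.insert r 0) d).get? r = some 0 := by
  induction rs with
  | nil => intro d r h; simp at h
  | cons a rest ih =>
    intro d r h
    simp only [List.foldl_cons]
    by_cases hr : r ∈ rest
    · exact ih _ r hr
    · have hra : r = a := by
        cases h with
        | head => rfl
        | tail _ h' => exact absurd h' hr
      subst hra
      have hc : (rest.foldl (fun (d : PySem.Dict String Int) r => d.insert r 0) (d.insert r 0)).contains r = true :=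
        seed_contains rest _ r (PySem.Dict.contains_insert_self _ _ _)
      rw [PySem.Dict.contains_eq_isSome_get?] at hc
      obtain ⟨v, hv⟩ := Option.isSome_iff_exists.mp hc
      rcases seed_val rest _ r v hv with h' | h'
      · rw [PySem.Dict.get?_insert_self] at h'
        rw [hv]; injection h' with h'; rw [h']
      · rw [hv, h']

-- ---- monotonicity / saturation / no-op facts about the reference expansion ----

theorem refIns_fold_contains (ns : PySem.Set String) (level : Int) :
    ∀ (l : List String) (st : PySem.Dict String Int × List String) (v : String),
      st.1.contains v = true → (l.foldl (refIns ns level) st).1.contains v = true := by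
  intro l
  induction l with
  | nil => intro st v h; exact h
  | cons y ys ih =>
    intro st v h
    rw [List.foldl_cons]
    apply ih
    unfold refIns
    split_ifs with hc
    · simp only [PySem.Dict.contains_insert, h, Bool.or_true]
    · exact h

theorem refStep_fold_contains (ns : PySem.Set String) (deps : List (String × List String)) (level : Int) :
    ∀ (g : List String) (st : PySem.Dict String Int × List String) (v : String),
      st.1.contains v = true → (g.foldl (refStep ns deps level) st).1.contains v = true := by
  intro g
  induction g with
  | nil => intro st v h; exact h
  | cons x xs ih =>
    intro st v h
    rw [List.foldl_cons]
    exact ih _ v (refIns_fold_contains ns level _ st v h)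

theorem refIns_sat_after (nodes : List String) (level : Int) :
    ∀ (l : List String) (st : PySem.Dict String Int × List String) (v : String),
      v ∈ l → nodes.contains v = true →
      (l.foldl (refIns (PySem.Set.ofList nodes) level) st).1.contains v = true := by
  intro l
  induction l with
  | nil => intro st v h; simp at h
  | cons y ys ih =>
    intro st v hmem hn
    rw [List.foldl_cons]
    by_cases hv : v ∈ ys
    · exact ih _ v hv hn
    · have hvy : v = y := by
        cases hmem with
        | head => rfl
        | tail _ h' => exact absurd h' hv
      subst hvy
      apply refIns_fold_contains
      unfold refIns
      split_ifs with hc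
      · exact PySem.Dict.contains_insert_self _ _ _
      · simp only [Bool.and_eq_true, Bool.not_eq_eq_eq_not, Bool.not_true, not_and] at hc
        rw [contains_ofList] at hc
        rcases Bool.eq_false_or_eq_true (st.1.contains v) with h | h
        · exact h
        · exact absurd h (hc hn)

-- after a frontier fold every frontier element is saturated
theorem refStep_fold_sat (nodes : List String) (deps : List (String × List String)) (level : Int) :
    ∀ (g : List String) (st : PySem.Dict String Int × List String) (x : String), x ∈ g →
      Sat nodes deps (g.foldl (refStep (PySem.Set.ofList nodes) deps level) st).1 x := by
  intro g
  induction g with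
  | nil => intro st x h; simp at h
  | cons y ys ih =>
    intro st x hmem
    rw [List.foldl_cons]
    by_cases hx : x ∈ ys
    · exact ih _ x hx
    · have hxy : x = y := by
        cases hmem with
        | head => rfl
        | tail _ h' => exact absurd h' hx
      subst hxy
      intro v hv hnv
      apply refStep_fold_contains
      exact refIns_sat_after nodes level (depsOf deps x) st v hv hnv

theorem refIns_fold_noop (nodes : List String) (level : Int) :
    ∀ (l : List String) (st : PySem.Dict String Int × List String),
      (∀ v ∈ l, nodes.contains v = true → st.1.contains v = true) →
      l.foldl (refIns (PySem.Set.ofList nodes) level) st = st := by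
  intro l
  induction l with
  | nil => intro st _; rfl
  | cons y ys ih =>
    intro st h
    rw [List.foldl_cons]
    have hstep : refIns (PySem.Set.ofList nodes) level st y = st := by
      unfold refIns
      by_cases hcond : (PySem.Set.contains (PySem.Set.ofList nodes) y && !st.1.contains y) = true
      · exfalso
        simp only [Bool.and_eq_true, Bool.not_eq_eq_eq_not, Bool.not_true] at hcond
        rw [contains_ofList] at hcond
        have hcy := h y (List.mem_cons_self ..) hcond.1
        rw [hcond.2] at hcy
        exact absurd hcy (by simp)
      · have hcf : (PySem.Set.contains (PySem.Set.ofList nodes) y && !st.1.contains y) = false :=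
          Bool.eq_false_iff.mpr hcond
        rw [hcf]
        simp
    rw [hstep]
    exact ih st (fun v hv => h v (List.mem_cons_of_mem _ hv))

theorem refStep_noop (nodes : List String) (deps : List (String × List String)) (level : Int)
    (st : PySem.Dict String Int × List String) (x : String) (h : Sat nodes deps st.1 x) :
    refStep (PySem.Set.ofList nodes) deps level st x = st :=
  refIns_fold_noop nodes level (depsOf deps x) st h

-- ---- first-occurrence dedup of the level-0 frontier (duplicate roots are no-ops) ----

theorem fdd_spec (nodes : List String) (deps : List (String × List String)) (level : Int) :
    ∀ (f : List String) (s : PySem.Set String) (st : PySem.Dict String Int × List String),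
      (∀ x ∈ s, Sat nodes deps st.1 x) →
      f.foldl (refStep (PySem.Set.ofList nodes) deps level) st =
        (fdd s f).foldl (refStep (PySem.Set.ofList nodes) deps level) st := by
  intro f
  induction f with
  | nil => intro s st _; rfl
  | cons x xs ih =>
    intro s st hs
    rw [List.foldl_cons, fdd]
    split_ifs with hc
    · have hx : x ∈ s := by
        simpa [PySem.Set.contains] using hc
      rw [refStep_noop nodes deps level st x (hs x hx)]
      exact ih s st hs
    · rw [List.foldl_cons]
      apply ih
      intro y hy
      by_cases hyx : y = x
      · subst hyx
        intro v hv hnv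
        exact refIns_sat_after nodes level (depsOf deps y) st v hv hnv
      · have hys : y ∈ s := by
          have := PySem.Set.mem_add (s := s) (x := x) (y := y)
          rw [this] at hy
          tauto
        intro v hv hnv
        have := hs y hys v hv hnv
        exact refIns_fold_contains _ _ _ _ _ this

theorem foldl_add_eq_fdd :
    ∀ (f : List String) (s : PySem.Set String),
      f.foldl PySem.Set.add s = s ++ fdd s f := by
  intro f
  induction f with
  | nil => intro s; simp [fdd]
  | cons x xs ih =>
    intro s
    rw [List.foldl_cons, fdd]
    split_ifs with hc
    · have hx : x ∈ s := by simpa [PySem.Set.contains] using hc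
      have : PySem.Set.add s x = s := by
        simp [PySem.Set.add, PySem.Set.contains, hx]
      rw [this, ih]
    · have hx : x ∉ s := by simpa [PySem.Set.contains] using hc
      have hadd : PySem.Set.add s x = s ++ [x] := by
        simp [PySem.Set.add, PySem.Set.contains, hx]
      rw [ih, hadd]
      simp

theorem ofList_eq_fdd (f : List String) : PySem.Set.ofList f = fdd [] f := by
  rw [PySem.Set.ofList_eq_foldl, foldl_add_eq_fdd]
  simp

-- the reference loop may dedup its frontier
theorem refLoop_dedup (nodes : List String) (deps : List (String × List String))
    (fuel : Nat) (level : Int) (d : PySem.Dict String Int) (f : List String) :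
    refLoop (PySem.Set.ofList nodes) deps fuel level d f =
      refLoop (PySem.Set.ofList nodes) deps fuel level d (PySem.Set.ofList f) := by
  match fuel, f with
  | fuel, [] => rfl
  | 0, x :: xs =>
    have hof : PySem.Set.ofList (x :: xs) = x :: fdd [x] xs := by
      rw [ofList_eq_fdd (x :: xs)]
      simp [fdd, PySem.Set.contains, PySem.Set.add]
    rw [hof]
    rfl
  | Nat.succ fu, x :: xs =>
    have hof : PySem.Set.ofList (x :: xs) = x :: fdd [x] xs := by
      rw [ofList_eq_fdd (x :: xs)]
      simp [fdd, PySem.Set.contains, PySem.Set.add]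
    have hfold : (x :: xs).foldl (refStep (PySem.Set.ofList nodes) deps level) (d, []) =
        (PySem.Set.ofList (x :: xs)).foldl (refStep (PySem.Set.ofList nodes) deps level) (d, []) := by
      rw [ofList_eq_fdd (x :: xs)]
      exact fdd_spec nodes deps level (x :: xs) [] (d, []) (by intro x hx; simp at hx)
    rw [hof] at hfold ⊢
    rw [refLoop, refLoop, hfold]

-- ---- B's comprehension fold: basic facts ----

theorem bstep_fold_noop (ns : PySem.Set String) (d : PySem.Dict String Int) (k : Int) :
    ∀ (l : List String) (m : PySem.Dict String Int),
      (∀ v ∈ l, (PySem.Set.contains ns v && !d.contains v) = false) →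
      l.foldl (bNewStep ns d k) m = m := by
  intro l
  induction l with
  | nil => intro m _; rfl
  | cons v vs ih =>
    intro m h
    rw [List.foldl_cons]
    have hstep : bNewStep ns d k m v = m := by
      unfold bNewStep
      rw [h v (List.mem_cons_self ..)]
      simp
    rw [hstep]
    exact ih m (fun v hv => h v (List.mem_cons_of_mem _ hv))

theorem bstep_fold_qprop (ns : PySem.Set String) (d : PySem.Dict String Int) (k : Int) :
    ∀ (l : List String) (m : PySem.Dict String Int),
      (∀ v, m.contains v = true → (PySem.Set.contains ns v && !d.contains v) = true) →
      ∀ v, (l.foldl (bNewStep ns d k) m).contains v = true →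
        (PySem.Set.contains ns v && !d.contains v) = true := by
  intro l
  induction l with
  | nil => intro m h v hv; exact h v hv
  | cons y ys ih =>
    intro m h v hv
    rw [List.foldl_cons] at hv
    refine ih _ ?_ v hv
    intro u hu
    unfold bNewStep at hu
    split_ifs at hu with hq
    · rw [PySem.Dict.contains_insert] at hu
      rcases Bool.or_eq_true_iff.mp hu with h' | h'
      · have : u = y := by simpa using h'
        subst this
        exact hq
      · exact h u h'
    · exact h u hu

theorem bstep_fold_nodup (ns : PySem.Set String) (d : PySem.Dict String Int) (k : Int) :
    ∀ (l : List String) (m : PySem.Dict String Int),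
      m.keys.Nodup → (l.foldl (bNewStep ns d k) m).keys.Nodup := by
  intro l
  induction l with
  | nil => intro m h; exact h
  | cons y ys ih =>
    intro m h
    rw [List.foldl_cons]
    apply ih
    unfold bNewStep
    split_ifs with hq
    · exact PySem.Dict.nodup_keys_insert _ _ _ h
    · exact h

-- overwriting a stored binding with its own value changes nothing
theorem insert_eq_self (d : PySem.Dict String Int) (v : String) (w : Int)
    (hnd : d.keys.Nodup) (h : d.get? v = some w) : d.insert v w = d := by
  apply PySem.Dict.ext
  rw [PySem.Dict.items_insert_of_contains _ _ (contains_of_get?_eq_some h)]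
  have hcongr : ∀ p ∈ d.items, (if p.1 == v then (v, w) else p) = p := by
    intro p hp
    by_cases hpv : p.1 = v
    · have hg : d.get? p.1 = some p.2 := PySem.Dict.get?_of_mem_items _ hp hnd
      rw [hpv, h] at hg
      injection hg with hg
      have hbeq : (p.1 == v) = true := by simp [hpv]
      simp only [hbeq, if_true]
      rw [← hpv, hg]
    · simp [hpv]
  rw [List.map_congr_left hcongr]
  exact List.map_id _

-- core simulation of one round: the reference expansion over a neighbour stream equals
-- B's comprehension fold against the fixed dict, merged in afterwards
theorem stream_fold (nodes : List String) (k : Int) (d : PySem.Dict String Int) :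
    ∀ (l : List String) (nd : PySem.Dict String Int),
      (∀ v w, nd.get? v = some w → w = k + 1) →
      (∀ v, nd.contains v = true → (PySem.Set.contains (PySem.Set.ofList nodes) v && !d.contains v) = true) →
      nd.keys.Nodup →
      (∀ v, (mrg d nd.items).contains v = (d.contains v || nd.contains v)) →
      l.foldl (refIns (PySem.Set.ofList nodes) k) (mrg d nd.items, nd.keys) =
        (mrg d ((l.foldl (bNewStep (PySem.Set.ofList nodes) d (k + 1)) nd).items),
         (l.foldl (bNewStep (PySem.Set.ofList nodes) d (k + 1)) nd).keys) := by
  intro l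
  induction l with
  | nil => intro nd _ _ _ _; rfl
  | cons v vs ih =>
    intro nd hval hq hndk hMC
    rw [List.foldl_cons, List.foldl_cons]
    by_cases hqv : (PySem.Set.contains (PySem.Set.ofList nodes) v && !d.contains v) = true
    · by_cases hcv : nd.contains v = true
      · -- already collected this round: both sides stall
        have hbs : bNewStep (PySem.Set.ofList nodes) d (k + 1) nd v = nd := by
          unfold bNewStep
          rw [hqv, if_pos rfl]
          have hsome : (nd.get? v).isSome = true := by
            rw [← PySem.Dict.contains_eq_isSome_get?]; exact hcv
          obtain ⟨w, hw⟩ := Option.isSome_iff_exists.mp hsome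
          have hwk := hval v w hw
          subst hwk
          exact insert_eq_self nd v _ hndk hw
        have hri : refIns (PySem.Set.ofList nodes) k (mrg d nd.items, nd.keys) v =
            (mrg d nd.items, nd.keys) := by
          unfold refIns
          have hMv : (mrg d nd.items).contains v = true := by rw [hMC v, hcv]; simp
          have hcf : (PySem.Set.contains (PySem.Set.ofList nodes) v && !(mrg d nd.items, nd.keys).1.contains v) = false := by
            simp only [hMv]
            simp
          rw [hcf]
          simp
        rw [hbs, hri]
        exact ih nd hval hq hndk hMC
      · -- fresh node: both sides collect v at depth k+1
        have hcv' : nd.contains v = false := by simpa using hcv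
        have hdv : d.contains v = false := by
          rcases Bool.and_eq_true_iff.mp hqv with ⟨_, h2⟩
          simpa using h2
        have hbs : bNewStep (PySem.Set.ofList nodes) d (k + 1) nd v = nd.insert v (k + 1) := by
          unfold bNewStep
          rw [hqv, if_pos rfl]
        have hMv : (mrg d nd.items).contains v = false := by
          rw [hMC v, hdv, hcv']
          rfl
        have hri : refIns (PySem.Set.ofList nodes) k (mrg d nd.items, nd.keys) v =
            ((mrg d nd.items).insert v (k + 1), nd.keys ++ [v]) := by
          unfold refIns
          have hsv : PySem.Set.contains (PySem.Set.ofList nodes) v = true :=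
            (Bool.and_eq_true_iff.mp hqv).1
          simp only [hsv, hMv]
          simp
        have hitems : (nd.insert v (k + 1)).items = nd.items ++ [(v, k + 1)] :=
          PySem.Dict.items_insert_of_not_contains _ _ hcv'
        have hmrg : mrg d ((nd.insert v (k + 1)).items) = (mrg d nd.items).insert v (k + 1) := by
          unfold mrg
          rw [hitems, List.foldl_append]
          rfl
        have hkeys : (nd.insert v (k + 1)).keys = nd.keys ++ [v] :=
          PySem.Dict.keys_insert_of_not_contains _ _ hcv'
        rw [hbs, hri, ← hmrg, ← hkeys]
        apply ih
        · intro u w hu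
          rw [PySem.Dict.get?_insert] at hu
          split_ifs at hu with he
          · injection hu with hu; omega
          · exact hval u w hu
        · intro u hu
          rw [PySem.Dict.contains_insert] at hu
          rcases Bool.or_eq_true_iff.mp hu with h' | h'
          · have : u = v := by simpa using h'
            subst this
            exact hqv
          · exact hq u h'
        · exact PySem.Dict.nodup_keys_insert _ _ _ hndk
        · intro u
          rw [hmrg, PySem.Dict.contains_insert, PySem.Dict.contains_insert, hMC u]
          cases hbe : (u == v) <;> cases d.contains u <;> cases nd.contains u <;> rfl
    · -- not a fresh member of nodes: both sides skip
      have hqf : (PySem.Set.contains (PySem.Set.ofList nodes) v && !d.contains v) = false :=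
        Bool.eq_false_iff.mpr hqv
      have hbs : bNewStep (PySem.Set.ofList nodes) d (k + 1) nd v = nd := by
        unfold bNewStep
        rw [hqf]
        simp
      have hri : refIns (PySem.Set.ofList nodes) k (mrg d nd.items, nd.keys) v =
          (mrg d nd.items, nd.keys) := by
        unfold refIns
        have hcf : (PySem.Set.contains (PySem.Set.ofList nodes) v && !(mrg d nd.items).contains v) = false := by
          rcases Bool.and_eq_false_iff.mp hqf with h' | h'
          · rw [h']; rfl
          · have hdc : d.contains v = true := by simpa using h'
            have : (mrg d nd.items).contains v = true := by rw [hMC v, hdc]; rfl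
            simp only [this]
            simp
        rw [hcf]
        simp
      rw [hbs, hri]
      exact ih nd hval hq hndk hMC

theorem mrg_nil (d : PySem.Dict String Int) : mrg d [] = d := rfl

-- second simulation: level-synchronous BFS = B's rescan fixpoint
theorem ref2b (nodes : List String) (deps : List (String × List String)) :
    ∀ (fuel : Nat) (k : Int) (d : PySem.Dict String Int) (g p : List String),
      (∀ x ∈ g, d.get? x = some k) →
      (∀ key v, d.get? key = some v → v ≤ k) →
      d.keys = p ++ g →
      (∀ u ∈ p, Sat nodes deps d u) →
      d.keys.Nodup →
      cnt nodes d + 1 ≤ fuel →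
      refLoop (PySem.Set.ofList nodes) deps fuel k d g =
        bLoop (PySem.Set.ofList nodes) deps fuel k d := by
  intro fuel
  induction fuel with
  | zero => intro k d g p _ _ _ _ _ hf; omega
  | succ fu ih =>
    intro k d g p hA1 hA2 hkeys hsatp hnd hfuel
    have hdeps : (fun u => (PySem.Dict.mk deps).getD u []) = depsOf deps := rfl
    have hstreamp : ∀ v ∈ p.flatMap (depsOf deps),
        (PySem.Set.contains (PySem.Set.ofList nodes) v && !d.contains v) = false := by
      intro v hv
      obtain ⟨u, hu, hvd⟩ := List.mem_flatMap.mp hv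
      by_cases hn : nodes.contains v = true
      · have hc := hsatp u hu v hvd hn
        rw [hc]
        simp only [Bool.not_true, Bool.and_false]
      · have hsc : PySem.Set.contains (PySem.Set.ofList nodes) v = false := by
          rw [contains_ofList]
          simpa using hn
        rw [hsc, Bool.false_and]
    have hnw : bNew (PySem.Set.ofList nodes) deps (k + 1) d =
        (g.flatMap (depsOf deps)).foldl (bNewStep (PySem.Set.ofList nodes) d (k + 1)) PySem.Dict.empty := by
      unfold bNew
      rw [hdeps, hkeys, List.flatMap_append, List.foldl_append,
          bstep_fold_noop _ _ _ _ _ hstreamp]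
    have hemp : (PySem.Dict.empty : PySem.Dict String Int).items = [] := by
      have h := PySem.Dict.keys_empty (κ := String) (ν := Int)
      simp only [PySem.Dict.keys] at h
      exact List.map_eq_nil_iff.mp h
    have hst : g.foldl (refStep (PySem.Set.ofList nodes) deps k) (d, []) =
        (mrg d (bNew (PySem.Set.ofList nodes) deps (k + 1) d).items,
         (bNew (PySem.Set.ofList nodes) deps (k + 1) d).keys) := by
      rw [hnw, foldl_refStep_flatMap]
      have h0 := stream_fold nodes k d (g.flatMap (depsOf deps)) PySem.Dict.empty
        (by intro v w hv; rw [PySem.Dict.get?_empty] at hv; exact absurd hv (by simp))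
        (by intro v hv; rw [PySem.Dict.contains_empty] at hv; exact absurd hv (by simp))
        (by rw [PySem.Dict.keys_empty]; exact List.nodup_nil)
        (by intro v; rw [hemp, mrg_nil, PySem.Dict.contains_empty, Bool.or_false])
      rw [hemp, mrg_nil, PySem.Dict.keys_empty] at h0
      exact h0
    have hqkeys : ∀ v, (bNew (PySem.Set.ofList nodes) deps (k + 1) d).contains v = true →
        (PySem.Set.contains (PySem.Set.ofList nodes) v && !d.contains v) = true := by
      intro v hv
      rw [hnw] at hv
      refine bstep_fold_qprop _ _ _ _ _ ?_ v hv
      intro u hu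
      rw [PySem.Dict.contains_empty] at hu
      exact absurd hu (by simp)
    have hnwnodup : (bNew (PySem.Set.ofList nodes) deps (k + 1) d).keys.Nodup := by
      rw [hnw]
      refine bstep_fold_nodup _ _ _ _ _ ?_
      rw [PySem.Dict.keys_empty]
      exact List.nodup_nil
    by_cases hni : (bNew (PySem.Set.ofList nodes) deps (k + 1) d).items.isEmpty = true
    · -- a round that adds nothing: both loops stop with d
      have hitems : (bNew (PySem.Set.ofList nodes) deps (k + 1) d).items = [] :=
        List.isEmpty_iff.mp hni
      have hkeys0 : (bNew (PySem.Set.ofList nodes) deps (k + 1) d).keys = [] := by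
        simp only [PySem.Dict.keys, hitems]
        rfl
      have hrefl : refLoop (PySem.Set.ofList nodes) deps (fu + 1) k d g = d := by
        cases g with
        | nil => exact refLoop_nil _ _ _ _ _
        | cons x gs =>
          rw [refLoop]
          rw [hst, hkeys0]
          rw [refLoop_nil]
          rw [hitems, mrg_nil]
      have hb : bLoop (PySem.Set.ofList nodes) deps (fu + 1) k d = d := by
        rw [bLoop]
        simp [hni]
      rw [hrefl, hb]
    · -- a continuing round
      have hfa : (bNew (PySem.Set.ofList nodes) deps (k + 1) d).items.isEmpty = false := by
        simpa using hni
      have hitems_ne : (bNew (PySem.Set.ofList nodes) deps (k + 1) d).items ≠ [] := by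
        intro hc
        rw [hc] at hfa
        simp at hfa
      have hkeysne : (bNew (PySem.Set.ofList nodes) deps (k + 1) d).keys ≠ [] := by
        simp only [PySem.Dict.keys]
        intro hc
        exact hitems_ne (List.map_eq_nil_iff.mp hc)
      cases g with
      | nil =>
        exfalso
        have hfold0 : ([] : List String).foldl (refStep (PySem.Set.ofList nodes) deps k) (d, []) = (d, []) := rfl
        rw [hfold0] at hst
        exact hkeysne (congrArg Prod.snd hst).symm
      | cons x gs =>
        obtain ⟨P1, P2, P3, P4⟩ := refFold_props nodes deps k (x :: gs) d
        rw [hst] at P1 P2 P3 P4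
        simp only at P1 P2 P3 P4
        have hfresh : ∀ a ∈ (bNew (PySem.Set.ofList nodes) deps (k + 1) d).items,
            d.contains a.1 = false := by
          intro a ha
          have hmem : a.1 ∈ (bNew (PySem.Set.ofList nodes) deps (k + 1) d).keys :=
            PySem.Dict.mem_keys_of_mem_items _ ha
          have hcont := (PySem.Dict.contains_iff_mem_keys _ _).mpr hmem
          rcases Bool.and_eq_true_iff.mp (hqkeys a.1 hcont) with ⟨_, h2⟩
          simpa using h2
        have hmapnodup : ((bNew (PySem.Set.ofList nodes) deps (k + 1) d).items.map Prod.fst).Nodup := by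
          simpa only [PySem.Dict.keys] using hnwnodup
        have hitems2 : (mrg d (bNew (PySem.Set.ofList nodes) deps (k + 1) d).items).items =
            d.items ++ (bNew (PySem.Set.ofList nodes) deps (k + 1) d).items := by
          unfold mrg
          rw [PySem.Dict.items_foldl_insert_fresh _ Prod.fst Prod.snd d hfresh hmapnodup]
          simp
        have hkeys2 : (mrg d (bNew (PySem.Set.ofList nodes) deps (k + 1) d).items).keys =
            (p ++ (x :: gs)) ++ (bNew (PySem.Set.ofList nodes) deps (k + 1) d).keys := by
          have hk2 : d.items.map Prod.fst = p ++ (x :: gs) := by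
            simpa only [PySem.Dict.keys] using hkeys
          simp only [PySem.Dict.keys, hitems2, List.map_append, hk2]
        have hnotin : ∀ a ∈ (bNew (PySem.Set.ofList nodes) deps (k + 1) d).keys,
            a ∉ p ++ (x :: gs) := by
          intro a ha hain
          have hcont := (PySem.Dict.contains_iff_mem_keys _ _).mpr ha
          rcases Bool.and_eq_true_iff.mp (hqkeys a hcont) with ⟨_, h2⟩
          have hdc : d.contains a = false := by simpa using h2
          have : a ∈ d.keys := by rw [hkeys]; exact hain
          rw [(PySem.Dict.contains_iff_mem_keys _ _).mpr this] at hdc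
          exact absurd hdc (by simp)
        rw [refLoop, bLoop]
        simp only [hfa, Bool.false_eq_true, if_false]
        rw [hst]
        have hmrgb : (bNew (PySem.Set.ofList nodes) deps (k + 1) d).items.foldl
            (fun m p => m.insert p.1 p.2) d = mrg d (bNew (PySem.Set.ofList nodes) deps (k + 1) d).items := rfl
        rw [hmrgb]
        refine ih (k + 1) (mrg d (bNew (PySem.Set.ofList nodes) deps (k + 1) d).items)
          (bNew (PySem.Set.ofList nodes) deps (k + 1) d).keys (p ++ (x :: gs)) ?_ ?_ ?_ ?_ ?_ ?_
        · exact P3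
        · intro key v hv
          rcases P2 key v hv with h' | h'
          · have := hA2 key v h'; omega
          · omega
        · exact hkeys2
        · intro u hu
          rcases List.mem_append.mp hu with hup | hug
          · intro v hv hn
            have hc := hsatp u hup v hv hn
            have hm := refStep_fold_contains (PySem.Set.ofList nodes) deps k (x :: gs) (d, []) v hc
            rw [hst] at hm
            exact hm
          · have hs := refStep_fold_sat nodes deps k (x :: gs) (d, []) u hug
            rw [hst] at hs
            exact hs
        · rw [hkeys2]
          refine List.Nodup.append ?_ hnwnodup ?_
          · rw [← hkeys]; exact hnd
          · intro a ha hb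
            exact hnotin a hb ha
        · have hlen : 1 ≤ (bNew (PySem.Set.ofList nodes) deps (k + 1) d).keys.length := by
            have := List.length_pos_iff.mpr hkeysne
            omega
          omega

-- ===== VERDICT (by name: the statement is the Claim_ definition above) =====
theorem compute_depths_spec : Claim_equal_compute_depths := by
  intro nodes deps roots _
  show compute_depths nodes deps roots = compute_depths_alt nodes deps roots
  unfold compute_depths compute_depths_alt
  rw [seed_pair roots PySem.Dict.empty []]
  simp only [List.nil_append]
  set d0 := roots.foldl (fun (d : PySem.Dict String Int) r => d.insert r 0) PySem.Dict.empty with hd0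
  have hz : ∀ k v, d0.get? k = some v → v ≤ 0 := by
    intro k v h
    rcases seed_val roots PySem.Dict.empty k v h with h' | h'
    · rw [PySem.Dict.get?_empty] at h'; exact absurd h' (by simp)
    · omega
  have hcnt : cnt nodes d0 ≤ nodes.length := by unfold cnt; exact List.countP_le_length
  have hA : aLoop nodes deps (nodes.length + roots.length) d0 roots =
      refLoop (PySem.Set.ofList nodes) deps (nodes.length + 1) 0 d0 roots := by
    apply loop_eq
    · intro r hr; exact seed_mem roots PySem.Dict.empty r hr
    · exact hz
    · omega
    · omega
  have hkeys0 : d0.keys = [] ++ PySem.Set.ofList roots := by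
    have h := PySem.Dict.keys_foldl_insert roots (fun _ _ => (0 : Int)) PySem.Dict.empty
    simp only [PySem.Dict.keys_empty] at h
    have h2 : PySem.Set.update ([] : PySem.Set String) roots = PySem.Set.ofList roots := by
      rw [PySem.Set.ofList_eq_foldl]
      rfl
    rw [hd0, List.nil_append]
    exact h.trans h2
  have hnodup0 : d0.keys.Nodup := by
    rw [hd0]
    exact PySem.Dict.nodup_keys_foldl_insert roots (fun _ _ => (0 : Int)) PySem.Dict.empty
      (by rw [PySem.Dict.keys_empty]; exact List.nodup_nil)
  have hB : refLoop (PySem.Set.ofList nodes) deps (nodes.length + 1) 0 d0 (PySem.Set.ofList roots) =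
      bLoop (PySem.Set.ofList nodes) deps (nodes.length + 1) 0 d0 := by
    apply ref2b nodes deps (nodes.length + 1) 0 d0 (PySem.Set.ofList roots) []
    · intro x hx
      have hxr : x ∈ roots := (PySem.Set.mem_ofList roots x).mp hx
      exact seed_mem roots PySem.Dict.empty x hxr
    · exact hz
    · exact hkeys0
    · intro u hu; simp at hu
    · exact hnodup0
    · omega
  rw [hA, refLoop_dedup, hB]
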